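-- pv_equiv track=rewrite | github.com/sergeygrigorev/Truth-Table-Builder | truthtable.py | make_calculable
-- ===== SOURCE A (Python) =====
-- def make_calculable(s):
--     replaces = [
--         ('!', '~'),
--         ('&', '*'),
--         ('|', '+'),
--         ('<->', '|'),
--         ('->', '&')
--     ]
--     for f, t in replaces:
--         s = s.replace(f, t)
--     return s
-- ===== SOURCE B (Python) =====
-- def make_calculable(s):
--     mapping = {'!': '~', '&': '*', '|': '+'}
--     out = []
--     i = 0
--     n = len(s)
--     while i < n:
--         if s.startswith('<->', i):
--             out.append('|')
--             i += 3
--         elif s.startswith('->', i):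
--             out.append('&')
--             i += 2
--         else:
--             c = s[i]
--             out.append(mapping.get(c, c))
--             i += 1
--     return ''.join(out)
-- ===== Notes on version B (the rewrite author's own statement) =====
-- stated objective: alternative
-- what changed: Replaced A's five sequential whole-string replace passes by a single left-to-right scan that matches the longer arrow token before the shorter one and maps single-character tokens through a dictionary, valid because no replacement output re-forms another source pattern.
import Mathlib
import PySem

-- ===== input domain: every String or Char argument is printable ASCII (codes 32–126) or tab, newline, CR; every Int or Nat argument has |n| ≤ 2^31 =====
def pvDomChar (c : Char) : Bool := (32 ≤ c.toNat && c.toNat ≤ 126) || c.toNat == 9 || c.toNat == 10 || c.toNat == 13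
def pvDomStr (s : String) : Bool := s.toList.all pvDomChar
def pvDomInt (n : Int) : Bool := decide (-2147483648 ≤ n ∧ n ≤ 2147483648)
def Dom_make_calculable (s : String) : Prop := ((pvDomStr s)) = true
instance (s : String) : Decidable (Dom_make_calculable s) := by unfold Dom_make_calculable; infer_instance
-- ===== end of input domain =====

-- B replaces A's five sequential str.replace passes by one left-to-right scan
-- (longest token '<->' checked first); same return value, alternative structure.

-- ===== PORT A =====
-- A: five sequential replaces, folded over the table in order.
def make_calculable (s : String) : String :=
  let replaces : List (String × String) :=
    [("!", "~"), ("&", "*"), ("|", "+"), ("<->", "|"), ("->", "&")]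
  replaces.foldl (fun s ft => PySem.Str.replace s ft.1 ft.2) s

-- ===== PORT B =====
-- Source B's mapping.get(c, c) for the single-char tokens
def mcSubst (c : Char) : Char :=
  if c = '!' then '~' else if c = '&' then '*' else if c = '|' then '+' else c

-- Source B's while loop: startswith '<->' / '->' at the cursor, else one char
def mcScan : List Char → List Char
  | [] => []
  | c :: t =>
    if c = '<' ∧ t.take 2 = ['-', '>'] then '|' :: mcScan (t.drop 2)
    else if c = '-' ∧ t.take 1 = ['>'] then '&' :: mcScan (t.drop 1)
    else mcSubst c :: mcScan t
termination_by l => l.length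
decreasing_by all_goals (simp; try omega)

def make_calculable_alt (s : String) : String := String.ofList (mcScan s.toList)

-- ===== PRECONDITION & SPEC =====
def Spec_make_calculable (s : String) (out : String) : Prop := out = make_calculable_alt s
instance (s : String) (out : String) : Decidable (Spec_make_calculable s out) := by unfold Spec_make_calculable; infer_instance

-- ===== CLAIM (what is proved, stated in full; the proofs are below) =====
def Claim_equal_make_calculable : Prop := ∀ (s : String), Dom_make_calculable s → Spec_make_calculable s (make_calculable s)

-- ===== LEMMAS AND PROOFS =====

-- fuel-indexed reformulation of PySem.Chars.replace.go without the accumulator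
def repG (old new : List Char) : Nat → List Char → List Char
  | 0, l => l
  | _ + 1, [] => []
  | fuel + 1, c :: t =>
    if old.isPrefixOf (c :: t) then new ++ repG old new fuel (List.drop old.length (c :: t))
    else c :: repG old new fuel t

theorem go_eq_repG (old new : List Char) :
    ∀ fuel l acc, PySem.Chars.replace.go old new fuel l acc = acc.reverse ++ repG old new fuel l := by
  intro fuel
  induction fuel with
  | zero => intro l acc; simp [PySem.Chars.replace.go, repG]
  | succ f ih =>
    intro l acc
    cases l with
    | nil => simp [PySem.Chars.replace.go, repG]
    | cons c t =>
      simp only [PySem.Chars.replace.go, repG]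
      split
      · rw [ih]; simp
      · rw [ih]; simp

theorem repG_fuel_irrel (old new : List Char) (hold : old ≠ []) :
    ∀ n l fuel₁ fuel₂, l.length = n → l.length ≤ fuel₁ → l.length ≤ fuel₂ →
      repG old new fuel₁ l = repG old new fuel₂ l := by
  intro n
  induction n using Nat.strong_induction_on with
  | _ n ih =>
    intro l fuel₁ fuel₂ hn h1 h2
    cases l with
    | nil => cases fuel₁ <;> cases fuel₂ <;> simp [repG]
    | cons c t =>
      have hop : 1 ≤ old.length := by
        cases old with | nil => exact absurd rfl hold | cons a b => simp
      have hlen : (c :: t).length = t.length + 1 := by simp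
      rw [hlen] at hn h1 h2
      cases fuel₁ with
      | zero => omega
      | succ f1 =>
        cases fuel₂ with
        | zero => omega
        | succ f2 =>
          have hd : (List.drop old.length (c :: t)).length = t.length + 1 - old.length := by
            simp
          simp only [repG]
          split
          · congr 1
            exact ih (List.drop old.length (c :: t)).length (by omega) _ f1 f2 rfl
              (by omega) (by omega)
          · congr 1
            exact ih t.length (by omega) t f1 f2 rfl (by omega) (by omega)

-- fuel-free form of PySem.Chars.replace (for nonempty pattern)
def repF (old new l : List Char) : List Char := repG old new l.length l

theorem replace_eq_repF (s old new : List Char) (h : old ≠ []) :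
    PySem.Chars.replace s old new = repF old new s := by
  rw [PySem.Chars.replace]
  simp [List.isEmpty_iff, h, go_eq_repG, repF]

theorem repF_nil (old new : List Char) : repF old new [] = [] := by simp [repF, repG]

theorem repF_cons (old new : List Char) (hold : old ≠ []) (c : Char) (t : List Char) :
    repF old new (c :: t) =
      if old.isPrefixOf (c :: t) then new ++ repF old new (List.drop old.length (c :: t))
      else c :: repF old new t := by
  have hop : 1 ≤ old.length := by
    cases old with | nil => exact absurd rfl hold | cons a b => simp
  show repG old new (t.length + 1) (c :: t) = _
  simp only [repG]
  split
  · congr 1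
    have hd : (List.drop old.length (c :: t)).length = t.length + 1 - old.length := by simp
    exact repG_fuel_irrel old new hold _ _ _ _ rfl (by omega) le_rfl
  · rfl

-- single-char replace is a map
theorem repF_single (c d : Char) (l : List Char) :
    repF [c] [d] l = l.map (fun x => if x = c then d else x) := by
  induction l with
  | nil => simp [repF_nil]
  | cons x t ih =>
    rw [repF_cons _ _ (by simp)]
    by_cases h : x = c
    · subst h
      simp [List.isPrefixOf, ih]
    · simp [List.isPrefixOf, Ne.symm h, h, ih]

-- the three single-char substitutions compose to mcSubst
theorem subst_comp (c : Char) :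
    (if (if (if c = '!' then '~' else c) = '&' then '*' else (if c = '!' then '~' else c)) = '|'
      then '+'
      else (if (if c = '!' then '~' else c) = '&' then '*' else (if c = '!' then '~' else c)))
      = mcSubst c := by
  unfold mcSubst
  by_cases h1 : c = '!' <;> by_cases h2 : c = '&' <;> by_cases h3 : c = '|' <;> simp_all

theorem mcSubst_eq_iff (c d : Char)
    (hd : d ≠ '~' ∧ d ≠ '*' ∧ d ≠ '+' ∧ d ≠ '!' ∧ d ≠ '&' ∧ d ≠ '|') :
    mcSubst c = d ↔ c = d := by
  obtain ⟨a1, a2, a3, a4, a5, a6⟩ := hd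
  unfold mcSubst
  split_ifs with h1 h2 h3
  · constructor
    · intro h; exact absurd h.symm a1
    · intro h; subst h; exact absurd h1 a4
  · constructor
    · intro h; exact absurd h.symm a2
    · intro h; subst h; exact absurd h2 a5
  · constructor
    · intro h; exact absurd h.symm a3
    · intro h; subst h; exact absurd h3 a6
  · exact Iff.rfl

-- if t does not start with '>', neither does the first replace pass of its mapped form
theorem rep1_head (t : List Char) (h : ¬ t.take 1 = ['>']) :
    ¬ (repF ['<', '-', '>'] ['|'] (t.map mcSubst)).take 1 = ['>'] := by
  cases t with
  | nil => simp [repF_nil]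
  | cons x r =>
    have hx : x ≠ '>' := by intro hx; subst hx; simp at h
    rw [List.map_cons, repF_cons _ _ (by simp)]
    split
    · simp
    · have : mcSubst x ≠ '>' := by
        intro hc
        exact hx ((mcSubst_eq_iff x '>' (by decide)).mp hc)
      simp [this]

theorem main_scan (l : List Char) :
    repF ['-', '>'] ['&'] (repF ['<', '-', '>'] ['|'] (l.map mcSubst)) = mcScan l := by
  induction hn : l.length using Nat.strong_induction_on generalizing l with
  | _ n ih =>
  cases l with
  | nil => simp [repF_nil, mcScan]
  | cons c t =>
    by_cases hA : c = '<' ∧ t.take 2 = ['-', '>']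
    · obtain ⟨hc, ht⟩ := hA
      subst hc
      have ht' : t = '-' :: '>' :: t.drop 2 := by
        conv_lhs => rw [← List.take_append_drop 2 t]
        rw [ht]; rfl
      obtain ⟨r, rfl⟩ : ∃ r, t = '-' :: '>' :: r := ⟨t.drop 2, ht'⟩
      rw [mcScan, if_pos (show ('<' : Char) = '<' ∧ List.take 2 ('-' :: '>' :: r) = ['-', '>']
        from ⟨rfl, rfl⟩)]
      simp only [List.map_cons]
      have e1 : mcSubst '<' = '<' := by decide
      have e2 : mcSubst '-' = '-' := by decide
      have e3 : mcSubst '>' = '>' := by decide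
      rw [e1, e2, e3, repF_cons _ _ (by simp),
        if_pos (show List.isPrefixOf ['<', '-', '>'] ('<' :: '-' :: '>' :: List.map mcSubst r)
          = true by simp [List.isPrefixOf])]
      show repF ['-', '>'] ['&'] ('|' :: repF ['<', '-', '>'] ['|'] (List.map mcSubst r)) = _
      rw [repF_cons _ _ (by simp), if_neg (by simp [List.isPrefixOf])]
      have hr : r.length < n := by simp at hn; omega
      rw [ih r.length hr r rfl]
      rfl
    · by_cases hB : c = '-' ∧ t.take 1 = ['>']
      · obtain ⟨hc, ht⟩ := hB
        subst hc
        have ht' : t = '>' :: t.drop 1 := by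
          conv_lhs => rw [← List.take_append_drop 1 t]
          rw [ht]; rfl
        obtain ⟨r, rfl⟩ : ∃ r, t = '>' :: r := ⟨t.drop 1, ht'⟩
        rw [mcScan, if_neg (by simp), if_pos (show ('-' : Char) = '-' ∧
          List.take 1 ('>' :: r) = ['>'] from ⟨rfl, rfl⟩)]
        simp only [List.map_cons]
        have e2 : mcSubst '-' = '-' := by decide
        have e3 : mcSubst '>' = '>' := by decide
        rw [e2, e3]
        rw [repF_cons ['<', '-', '>'] ['|'] (by simp) '-' ('>' :: List.map mcSubst r),
          if_neg (by simp [List.isPrefixOf]),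
          repF_cons ['<', '-', '>'] ['|'] (by simp) '>' (List.map mcSubst r),
          if_neg (by simp [List.isPrefixOf]),
          repF_cons ['-', '>'] ['&'] (by simp) '-'
            ('>' :: repF ['<', '-', '>'] ['|'] (List.map mcSubst r)),
          if_pos (by simp [List.isPrefixOf])]
        show '&' :: repF ['-', '>'] ['&'] (repF ['<', '-', '>'] ['|'] (List.map mcSubst r))
          = '&' :: mcScan (List.drop 1 ('>' :: r))
        have hr : r.length < n := by simp at hn; omega
        rw [ih r.length hr r rfl]
        rfl
      · rw [mcScan, if_neg hA, if_neg hB, List.map_cons]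
        have hpre1 : ¬ (List.isPrefixOf ['<', '-', '>'] (mcSubst c :: List.map mcSubst t) = true) := by
          rw [List.isPrefixOf_iff_prefix, List.cons_prefix_cons]
          rintro ⟨h1, h2⟩
          have hc : c = '<' := (mcSubst_eq_iff c '<' (by decide)).mp h1.symm
          apply hA
          refine ⟨hc, ?_⟩
          cases t with
          | nil => simp at h2
          | cons a r =>
            rw [List.map_cons, List.cons_prefix_cons] at h2
            obtain ⟨ha, h3⟩ := h2
            have ha' : a = '-' := (mcSubst_eq_iff a '-' (by decide)).mp ha.symm
            cases r with
            | nil => simp at h3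
            | cons b r2 =>
              rw [List.map_cons, List.cons_prefix_cons] at h3
              have hb : b = '>' := (mcSubst_eq_iff b '>' (by decide)).mp h3.1.symm
              simp [ha', hb]
        rw [repF_cons _ _ (by simp), if_neg hpre1]
        have hpre2 : ¬ (List.isPrefixOf ['-', '>']
            (mcSubst c :: repF ['<', '-', '>'] ['|'] (List.map mcSubst t)) = true) := by
          rw [List.isPrefixOf_iff_prefix, List.cons_prefix_cons]
          rintro ⟨h1, h2⟩
          have hc : c = '-' := (mcSubst_eq_iff c '-' (by decide)).mp h1.symm
          have hnt : ¬ t.take 1 = ['>'] := fun h => hB ⟨hc, h⟩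
          apply rep1_head t hnt
          obtain ⟨s, hs⟩ := h2
          rw [← hs]
          rfl
        rw [repF_cons _ _ (by simp), if_neg hpre2]
        have hr : t.length < n := by simp at hn; omega
        rw [ih t.length hr t rfl]

-- ===== VERDICT (by name: the statement is the Claim_ definition above) =====
theorem make_calculable_spec : Claim_equal_make_calculable := by
  intro s _
  unfold Spec_make_calculable make_calculable make_calculable_alt
  simp only [List.foldl, PySem.Str.replace, String.toList_ofList]
  congr 1
  simp only [show ("!".toList : List Char) = ['!'] from rfl,
    show ("~".toList : List Char) = ['~'] from rfl,
    show ("&".toList : List Char) = ['&'] from rfl,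
    show ("*".toList : List Char) = ['*'] from rfl,
    show ("|".toList : List Char) = ['|'] from rfl,
    show ("+".toList : List Char) = ['+'] from rfl,
    show ("<->".toList : List Char) = ['<', '-', '>'] from rfl,
    show ("->".toList : List Char) = ['-', '>'] from rfl]
  rw [replace_eq_repF _ _ _ (by simp), replace_eq_repF _ _ _ (by simp),
    replace_eq_repF _ _ _ (by simp), replace_eq_repF _ _ _ (by simp),
    replace_eq_repF _ _ _ (by simp)]
  rw [repF_single, repF_single, repF_single, List.map_map, List.map_map]
  have hcomp : (((fun x => if x = '|' then '+' else x) ∘ (fun x => if x = '&' then '*' else x)) ∘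
      (fun x => if x = '!' then '~' else x)) = mcSubst := by
    funext c
    exact subst_comp c
  rw [hcomp]
  exact main_scan s.toList
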